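-- pv_equiv track=rewrite | github.com/ImperialCollegeLondon/m4r_code | Application to Election Data/hashtag_cooccurrence_network.py | get_cooccurrence_matrix
-- ===== SOURCE A (Python) =====
-- def get_cooccurrence_matrix(df):
--     """
--     Returns a cooccurrence matrix: a dictionary of dictionaries
--     say we have a hashtag pair (#apples, #bananas)
--     the outer dictionary will contain apples,
--     then the inner dictionary will contain bananas : 1 (the count that they appear together)
--     """
--     H = {} # initialising an empty matrix
--     for h in df: # Iterating through each of the tweets hashtags
--         for i in range(len(h)-1): # Triangular iteration since (A, B) = (B, A)
--             if h[i] not in H.keys(): # adding an empty entry if it is not currently present in the outer dictionary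
--                 H[h[i]] = {}
--             for j in range(i+1, len(h)):
--                 if h[j] not in H[h[i]].keys():
--                     H[h[i]][h[j]] = 1 # initialising count
--                 else:
--                     H[h[i]][h[j]] += 1 # updating count
--     return H
-- ===== SOURCE B (Python) =====
-- def get_cooccurrence_matrix(df):
--     # Two flat passes instead of incremental nested-dict construction: first group
--     # every later co-hashtag under its earlier partner, then count each group.
--     seconds = {}
--     for h in df:
--         for k, a in enumerate(h[:-1]):
--             seconds.setdefault(a, []).extend(h[k + 1:])
--     H = {}
--     for a, bs in seconds.items():
--         inner = {}
--         for b in bs: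
--             inner[b] = inner.get(b, 0) + 1
--         H[a] = inner
--     return H
-- ===== Notes on version B (the rewrite author's own statement) =====
-- stated objective: faster
-- what changed: A interleaves membership tests and per-pair nested-dict updates inside its triangular index loop; B makes two flat passes: it first groups all later co-hashtags under their earlier partner with bulk list extends, then counts each group into its inner dict.
import Mathlib
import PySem

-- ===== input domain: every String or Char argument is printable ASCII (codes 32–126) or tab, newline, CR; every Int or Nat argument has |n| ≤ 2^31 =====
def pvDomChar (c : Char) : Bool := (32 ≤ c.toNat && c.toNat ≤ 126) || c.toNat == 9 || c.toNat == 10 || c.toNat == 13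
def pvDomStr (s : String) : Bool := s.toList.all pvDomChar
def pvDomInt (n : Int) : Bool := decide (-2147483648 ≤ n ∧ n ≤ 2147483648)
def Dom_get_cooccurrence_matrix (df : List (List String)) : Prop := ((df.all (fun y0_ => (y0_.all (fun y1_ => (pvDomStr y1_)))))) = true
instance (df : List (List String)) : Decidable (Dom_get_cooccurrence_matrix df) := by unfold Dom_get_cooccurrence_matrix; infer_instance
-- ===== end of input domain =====

-- B replaces A's incremental nested-dict construction by two flat passes (group all later
-- co-hashtags under their earlier partner, then count each group), measured faster by a
-- constant factor; same result including insertion order.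


-- ===== PORT A =====
def get_cooccurrence_matrix (df : List (List String)) : List (String × List (String × Int)) :=
  let H := df.foldl (fun H h =>
    (PySem.List.pyRange 0 ((h.length : Int) - 1) 1).foldl (fun H i =>
      let hi := PySem.List.pyGetD h i ""
      let H := if H.contains hi then H else H.insert hi PySem.Dict.empty
      (PySem.List.pyRange (i + 1) (h.length : Int) 1).foldl (fun H j =>
        let hj := PySem.List.pyGetD h j ""
        let inner := H.getD hi PySem.Dict.empty
        if inner.contains hj then
          H.insert hi (inner.insert hj (inner.getD hj 0 + 1))
        else
          H.insert hi (inner.insert hj 1)) H) H)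
    (PySem.Dict.empty : PySem.Dict String (PySem.Dict String Int))
  H.items.map (fun kv => (kv.1, kv.2.items))

-- ===== PORT B =====
def get_cooccurrence_matrix_alt (df : List (List String)) : List (String × List (String × Int)) :=
  let seconds := df.foldl (fun d h =>
    (PySem.List.enumerate (PySem.List.slice h none (some (-1)))).foldl
      (fun d ka => d.modify ka.2 [] (fun l => l ++ PySem.List.slice h (some (ka.1 + 1)) none)) d)
    (PySem.Dict.empty : PySem.Dict String (List String))
  seconds.items.map (fun kv =>
    (kv.1, (kv.2.foldl (fun inner b => inner.insert b (inner.getD b 0 + 1))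
      (PySem.Dict.empty : PySem.Dict String Int)).items))

-- ===== PRECONDITION & SPEC =====
def Spec_get_cooccurrence_matrix (df : List (List String)) (out : List (String × List (String × Int))) : Prop := out = get_cooccurrence_matrix_alt df
instance (df : List (List String)) (out : List (String × List (String × Int))) : Decidable (Spec_get_cooccurrence_matrix df out) := by unfold Spec_get_cooccurrence_matrix; infer_instance

-- ===== CLAIM (what is proved, stated in full; the proofs are below) =====
def Claim_equal_get_cooccurrence_matrix : Prop := ∀ (df : List (List String)), Dom_get_cooccurrence_matrix df → Spec_get_cooccurrence_matrix df (get_cooccurrence_matrix df)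

-- ===== LEMMAS AND PROOFS =====

-- proof-side vocabulary: pairs2 is the per-tweet pair list both programs traverse,
-- pvBump/pvEnsure/pvEbump one co-occurrence update, pvFirsts/pvInner/pvCanon the canonical
-- matrix both programs are shown to build.
def pairs2 (h : List String) : List (String × String) :=
  match h with
  | [] => []
  | x :: xs => xs.map (fun y => (x, y)) ++ pairs2 xs








def pvBump (H : PySem.Dict String (PySem.Dict String Int)) (a b : String) :
    PySem.Dict String (PySem.Dict String Int) :=
  H.insert a ((H.getD a PySem.Dict.empty).insert b ((H.getD a PySem.Dict.empty).getD b 0 + 1))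

def pvEnsure (H : PySem.Dict String (PySem.Dict String Int)) (a : String) :
    PySem.Dict String (PySem.Dict String Int) :=
  if H.contains a then H else H.insert a PySem.Dict.empty

def pvEbump (H : PySem.Dict String (PySem.Dict String Int)) (p : String × String) :
    PySem.Dict String (PySem.Dict String Int) :=
  pvBump (pvEnsure H p.1) p.1 p.2

def pvFirsts (P : List (String × String)) : List String :=
  PySem.Set.ofList (P.map (·.1))

def pvInner (P : List (String × String)) (a : String) : List (String × Int) :=
  (PySem.Set.ofList ((P.filter (fun p => p.1 == a)).map (·.2))).map
    (fun b => (b, (P.count (a, b) : Int)))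

def pvCanon (P : List (String × String)) : PySem.Dict String (PySem.Dict String Int) :=
  PySem.Dict.mk ((pvFirsts P).map (fun a => (a, PySem.Dict.mk (pvInner P a))))

theorem pv_get?_map {ν : Type} (L : List String) (g : String → ν) (k : String) :
    (PySem.Dict.mk (L.map (fun a => (a, g a)))).get? k = if k ∈ L then some (g k) else none := by
  induction L with
  | nil => simp [PySem.Dict.get?]
  | cons x xs ih =>
    simp only [List.map_cons, PySem.Dict.get?_mk_cons, ih, List.mem_cons, beq_iff_eq]
    by_cases hx : x = k
    · subst hx; simp
    · simp [hx, Ne.symm hx]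

theorem pv_getD_map {ν : Type} (L : List String) (g : String → ν) (k : String) (d : ν) :
    (PySem.Dict.mk (L.map (fun a => (a, g a)))).getD k d = if k ∈ L then g k else d := by
  rw [PySem.Dict.getD_eq_get?_getD, pv_get?_map]
  by_cases h : k ∈ L <;> simp [h]

theorem pv_contains_map {ν : Type} (L : List String) (g : String → ν) (k : String) :
    (PySem.Dict.mk (L.map (fun a => (a, g a)))).contains k = decide (k ∈ L) := by
  rw [PySem.Dict.contains_eq_isSome_get?, pv_get?_map]
  by_cases h : k ∈ L <;> simp [h]

theorem pvInner_ne (Q : List (String × String)) (p : String × String) (a' : String)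
    (h : a' ≠ p.1) : pvInner (Q ++ [p]) a' = pvInner Q a' := by
  unfold pvInner
  have hf : (Q ++ [p]).filter (fun q => q.1 == a') = Q.filter (fun q => q.1 == a') := by
    rw [List.filter_append]
    have : (p.1 == a') = false := by rw [beq_eq_false_iff_ne]; exact fun he => h he.symm
    simp [List.filter, this]
  rw [hf]
  apply List.map_congr_left
  intro b hb
  have : (Q ++ [p]).count (a', b) = Q.count (a', b) := by
    rw [List.count_append]
    simp only [List.count_singleton]
    have : ¬ ((a', b) = p) := by
      intro he; exact h (by rw [← he])
    have h2 : ¬ (p = (a', b)) := fun he => this he.symm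
    simp [beq_iff_eq, h2]
  rw [this]

theorem pvInner_eq (Q : List (String × String)) (a b : String) :
    pvInner (Q ++ [(a, b)]) a =
      (PySem.Set.add (PySem.Set.ofList ((Q.filter (fun q => q.1 == a)).map (·.2))) b).map
        (fun b' => (b', (Q.count (a, b') : Int) + if b' = b then 1 else 0)) := by
  unfold pvInner
  have hf : ((Q ++ [(a, b)]).filter (fun q => q.1 == a)).map (·.2)
      = (Q.filter (fun q => q.1 == a)).map (·.2) ++ [b] := by
    rw [List.filter_append]; simp
  rw [hf, PySem.Set.ofList_append_singleton]
  apply List.map_congr_left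
  intro b' _
  have : (Q ++ [(a, b)]).count (a, b') = Q.count (a, b') + if b' = b then 1 else 0 := by
    rw [List.count_append, List.count_singleton]
    by_cases hb : b' = b
    · subst hb; simp
    · have h3 : ¬ (b = b') := fun he => hb he.symm
      simp [beq_iff_eq, hb, h3]
  rw [this]
  push_cast
  by_cases hb : b' = b <;> simp [hb]

theorem pv_mem_seconds (Q : List (String × String)) (a b : String) :
    b ∈ PySem.Set.ofList ((Q.filter (fun q => q.1 == a)).map (·.2)) ↔ (a, b) ∈ Q := by
  rw [PySem.Set.mem_ofList]
  constructor
  · rintro h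
    obtain ⟨q, hq, hb⟩ := List.mem_map.mp h
    obtain ⟨hqQ, hqa⟩ := List.mem_filter.mp hq
    have : q = (a, b) := by
      obtain ⟨q1, q2⟩ := q
      simp only [beq_iff_eq] at hqa
      simp_all
    rwa [this] at hqQ
  · intro h
    exact List.mem_map.mpr ⟨(a, b), List.mem_filter.mpr ⟨h, by simp⟩, rfl⟩

theorem pv_step (Q : List (String × String)) (p : String × String) :
    pvEbump (pvCanon Q) p = pvCanon (Q ++ [p]) := by
  obtain ⟨a, b⟩ := p
  have hfirsts : (Q ++ [(a, b)]).map (·.1) = Q.map (·.1) ++ [a] := by simp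
  by_cases hA : a ∈ Q.map (·.1)
  case pos =>
    have hAf : a ∈ pvFirsts Q := by rw [pvFirsts, PySem.Set.mem_ofList]; exact hA
    have hc : (pvCanon Q).contains a = true := by
      rw [pvCanon, pv_contains_map]; simp [hAf]
    have hens : pvEnsure (pvCanon Q) a = pvCanon Q := by rw [pvEnsure, hc]; simp
    have hgetD : (pvCanon Q).getD a PySem.Dict.empty = PySem.Dict.mk (pvInner Q a) := by
      rw [pvCanon, pv_getD_map]; simp [hAf]
    have hFnew : pvFirsts (Q ++ [(a, b)]) = pvFirsts Q := by
      rw [pvFirsts, hfirsts, PySem.Set.ofList_append_singleton]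
      exact PySem.Set.add_of_mem hAf
    set S := PySem.Set.ofList ((Q.filter (fun q => q.1 == a)).map (·.2)) with hS
    have hinner : pvInner Q a = S.map (fun b' => (b', (Q.count (a, b') : Int))) := rfl
    have hdg : (PySem.Dict.mk (pvInner Q a)).getD b 0 = (Q.count (a, b) : Int) := by
      rw [hinner, pv_getD_map]
      by_cases hb : b ∈ S
      · simp [hb]
      · have : (a, b) ∉ Q := fun hm => hb ((pv_mem_seconds Q a b).mpr hm)
        simp [hb, List.count_eq_zero.mpr this]
    have hnew : (PySem.Dict.mk (pvInner Q a)).insert b ((Q.count (a, b) : Int) + 1)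
        = PySem.Dict.mk (pvInner (Q ++ [(a, b)]) a) := by
      apply PySem.Dict.ext
      rw [pvInner_eq Q a b, ← hS]
      by_cases hb : b ∈ S
      · have hcb : (PySem.Dict.mk (pvInner Q a)).contains b = true := by
          rw [hinner, pv_contains_map]; simp [hb]
        rw [PySem.Dict.items_insert_of_contains _ _ hcb]
        rw [PySem.Set.add_of_mem hb]
        show (List.map _ (pvInner Q a)) = _
        rw [hinner, List.map_map]
        apply List.map_congr_left
        intro b' _
        by_cases hbb : b' = b
        · subst hbb; simp
        · have : ¬ (b' == b) = true := by simp [hbb]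
          simp [Function.comp, this, hbb]
      · have hcb : (PySem.Dict.mk (pvInner Q a)).contains b = false := by
          rw [hinner, pv_contains_map]; simp [hb]
        rw [PySem.Dict.items_insert_of_not_contains _ _ hcb]
        rw [PySem.Set.add_of_not_mem hb]
        show pvInner Q a ++ _ = _
        rw [hinner, List.map_append]
        congr 1
        · apply List.map_congr_left
          intro b' hb'
          have hbb : ¬ (b' = b) := fun he => hb (he ▸ hb')
          simp [hbb]
        · have : (a, b) ∉ Q := fun hm => hb ((pv_mem_seconds Q a b).mpr hm)
          simp [List.count_eq_zero.mpr this]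
    show pvBump (pvEnsure (pvCanon Q) a) a b = _
    rw [hens, pvBump, hgetD, hdg, hnew]
    apply PySem.Dict.ext
    rw [PySem.Dict.items_insert_of_contains _ _ hc]
    show (List.map _ ((pvFirsts Q).map _)) = (pvFirsts (Q ++ [(a, b)])).map _
    rw [hFnew, List.map_map]
    apply List.map_congr_left
    intro a' _
    by_cases haa : a' = a
    · subst haa; simp
    · have : ¬ (a' == a) = true := by simp [haa]
      simp only [Function.comp]
      rw [pvInner_ne Q (a, b) a' haa]
      simp [this]
  case neg =>
    have hAf : a ∉ pvFirsts Q := by rw [pvFirsts, PySem.Set.mem_ofList]; exact hA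
    have hc : (pvCanon Q).contains a = false := by
      rw [pvCanon, pv_contains_map]; simp [hAf]
    have hFnew : pvFirsts (Q ++ [(a, b)]) = pvFirsts Q ++ [a] := by
      rw [pvFirsts, hfirsts, PySem.Set.ofList_append_singleton]
      exact PySem.Set.add_of_not_mem hAf
    have hD1 : pvEnsure (pvCanon Q) a = PySem.Dict.mk ((pvFirsts Q ++ [a]).map
        (fun a' => (a', if a' = a then PySem.Dict.empty else PySem.Dict.mk (pvInner Q a')))) := by
      rw [pvEnsure, hc]
      simp only [Bool.false_eq_true, if_false]
      apply PySem.Dict.ext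
      rw [PySem.Dict.items_insert_of_not_contains _ _ hc, List.map_append]
      congr 1
      · show ((pvFirsts Q).map _) = _
        apply List.map_congr_left
        intro a' ha'
        have : ¬ (a' = a) := fun he => hAf (he ▸ ha')
        simp [this]
      · simp
    have hfilter : Q.filter (fun q => q.1 == a) = [] := by
      apply List.filter_eq_nil_iff.mpr
      intro q hq
      simp only [beq_iff_eq]
      exact fun he => hA (List.mem_map.mpr ⟨q, hq, he⟩)
    have hcount : Q.count (a, b) = 0 :=
      List.count_eq_zero.mpr (fun hm => hA (List.mem_map.mpr ⟨(a, b), hm, rfl⟩))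
    have hInew : pvInner (Q ++ [(a, b)]) a = [(b, 1)] := by
      rw [pvInner_eq Q a b, hfilter]
      show (PySem.Set.add (PySem.Set.ofList []) b).map _ = _
      rw [PySem.Set.ofList_nil, PySem.Set.add_of_not_mem (by simp)]
      simp [hcount]
    have hnew : (PySem.Dict.empty : PySem.Dict String Int).insert b ((PySem.Dict.empty :
        PySem.Dict String Int).getD b 0 + 1) = PySem.Dict.mk (pvInner (Q ++ [(a, b)]) a) := by
      apply PySem.Dict.ext
      rw [PySem.Dict.items_insert_of_not_contains _ _ (PySem.Dict.contains_empty b), hInew,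
        PySem.Dict.getD_empty]
      simp [PySem.Dict.empty]
    have hD1c : (pvEnsure (pvCanon Q) a).contains a = true := by
      rw [hD1, pv_contains_map]; simp
    have hD1g : (pvEnsure (pvCanon Q) a).getD a PySem.Dict.empty = PySem.Dict.empty := by
      rw [hD1, pv_getD_map]; simp
    show pvBump (pvEnsure (pvCanon Q) a) a b = _
    rw [pvBump, hD1g, hnew]
    apply PySem.Dict.ext
    rw [PySem.Dict.items_insert_of_contains _ _ hD1c, hD1]
    show (List.map _ ((pvFirsts Q ++ [a]).map _)) = (pvFirsts (Q ++ [(a, b)])).map _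
    rw [hFnew, List.map_map]
    apply List.map_congr_left
    intro a' ha'
    rcases List.mem_append.mp ha' with h1 | h1
    · have haa : ¬ (a' = a) := fun he => hAf (he ▸ h1)
      have : ¬ (a' == a) = true := by simp [haa]
      simp only [Function.comp]
      rw [pvInner_ne Q (a, b) a' haa]
      simp [this, haa]
    · have haa : a' = a := by simpa using h1
      subst haa
      simp

theorem pv_main (P : List (String × String)) :
    P.foldl pvEbump PySem.Dict.empty = pvCanon P := by
  induction P using List.reverseRecOn with
  | nil => rfl
  | append_singleton Q p ih =>
    rw [List.foldl_append, List.foldl_cons, List.foldl_nil, ih, pv_step]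

def pvBodyA (h : List String) (H : PySem.Dict String (PySem.Dict String Int)) (i : Int) :
    PySem.Dict String (PySem.Dict String Int) :=
  let hi := PySem.List.pyGetD h i ""
  let H := if H.contains hi then H else H.insert hi PySem.Dict.empty
  (PySem.List.pyRange (i + 1) (h.length : Int) 1).foldl (fun H j =>
    let hj := PySem.List.pyGetD h j ""
    let inner := H.getD hi PySem.Dict.empty
    if inner.contains hj then
      H.insert hi (inner.insert hj (inner.getD hj 0 + 1))
    else
      H.insert hi (inner.insert hj 1)) H

theorem pv_bodyfun (h : List String) (hi : String) :
    (fun (H : PySem.Dict String (PySem.Dict String Int)) (j : Int) =>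
      let hj := PySem.List.pyGetD h j ""
      let inner := H.getD hi PySem.Dict.empty
      if inner.contains hj then
        H.insert hi (inner.insert hj (inner.getD hj 0 + 1))
      else
        H.insert hi (inner.insert hj 1))
    = fun H j => pvBump H hi (PySem.List.pyGetD h j "") := by
  funext H j
  show (if ((H.getD hi PySem.Dict.empty).contains (PySem.List.pyGetD h j "")) then _ else _) = _
  rw [pvBump]
  by_cases hc : (H.getD hi PySem.Dict.empty).contains (PySem.List.pyGetD h j "") = true
  · simp [hc]
  · simp only [Bool.not_eq_true] at hc
    rw [PySem.Dict.getD_of_not_contains (h := hc)]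
    simp [hc]

theorem pv_bodyA_eq (h : List String) (H : PySem.Dict String (PySem.Dict String Int))
    (i : Int) (hi0 : 0 ≤ i) :
    pvBodyA h H i = (h.drop (i + 1).toNat).foldl
      (fun H y => pvBump H (PySem.List.pyGetD h i "") y)
      (pvEnsure H (PySem.List.pyGetD h i "")) := by
  unfold pvBodyA pvEnsure
  simp only [pv_bodyfun]
  exact PySem.List.foldl_pyRange_pyGetD' h ""
    (fun H y => pvBump H (PySem.List.pyGetD h i "") y)
    (if H.contains (PySem.List.pyGetD h i "") then H
     else H.insert (PySem.List.pyGetD h i "") PySem.Dict.empty)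
    (a := i + 1) (by omega)

theorem pv_group (ys : List String) (K : PySem.Dict String (PySem.Dict String Int))
    (a : String) (hK : K.contains a = true) :
    ys.foldl (fun H y => pvBump H a y) K = ys.foldl (fun H y => pvEbump H (a, y)) K := by
  induction ys generalizing K with
  | nil => rfl
  | cons y ys ih =>
    simp only [List.foldl_cons]
    have he : pvEbump K (a, y) = pvBump K a y := by
      unfold pvEbump pvEnsure
      simp [hK]
    rw [he]
    exact ih _ (by rw [pvBump]; exact PySem.Dict.contains_insert_self _ _ _)

theorem pv_bodyA_shift (x : String) (xs : List String)
    (H : PySem.Dict String (PySem.Dict String Int)) (k : Nat) :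
    pvBodyA (x :: xs) H (1 + (k : Int)) = pvBodyA xs H ((k : Int)) := by
  rw [pv_bodyA_eq _ _ _ (by positivity), pv_bodyA_eq _ _ _ (Int.natCast_nonneg k)]
  have hget : PySem.List.pyGetD (x :: xs) (1 + (k : Int)) "" = PySem.List.pyGetD xs (k : Int) "" := by
    rw [PySem.List.pyGetD_of_nonneg _ _ (by positivity), PySem.List.pyGetD_of_nonneg _ _ (Int.natCast_nonneg k)]
    have : (1 + (k : Int)).toNat = k + 1 := by omega
    rw [this]
    simp
  have hdrop : (x :: xs).drop ((1 + (k : Int)) + 1).toNat = xs.drop ((k : Int) + 1).toNat := by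
    have h1 : ((1 + (k : Int)) + 1).toNat = (k + 1) + 1 := by omega
    have h2 : ((k : Int) + 1).toNat = k + 1 := by omega
    rw [h1, h2, List.drop_succ_cons]
  rw [hget, hdrop]

theorem pv_shift (x : String) (xs : List String)
    (K : PySem.Dict String (PySem.Dict String Int)) :
    (PySem.List.pyRange 1 ((xs.length : Int)) 1).foldl (pvBodyA (x :: xs)) K
      = (PySem.List.pyRange 0 ((xs.length : Int) - 1) 1).foldl (pvBodyA xs) K := by
  rw [PySem.List.pyRange_one 1 _, PySem.List.pyRange_one 0 _]
  have : ((xs.length : Int) - 1 - 0).toNat = ((xs.length : Int) - 1).toNat := by omega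
  rw [this]
  rw [List.foldl_map, List.foldl_map]
  congr 1
  funext H k
  rw [pv_bodyA_shift]
  norm_num

theorem pv_outer (h : List String) (H : PySem.Dict String (PySem.Dict String Int)) :
    (PySem.List.pyRange 0 ((h.length : Int) - 1) 1).foldl (pvBodyA h) H
      = (pairs2 h).foldl pvEbump H := by
  induction h generalizing H with
  | nil =>
    rw [PySem.List.pyRange_one_eq_nil (by simp)]
    rfl
  | cons x xs ih =>
    cases xs with
    | nil =>
      rw [PySem.List.pyRange_one_eq_nil (by simp)]
      rfl
    | cons y ys =>
      have hn : (0 : Int) < (((y :: ys).length : Int)) := by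
        simp only [List.length_cons]; push_cast; omega
      have hb : (((x :: y :: ys).length : Int)) - 1 = ((y :: ys).length : Int) := by
        simp only [List.length_cons]; push_cast; omega
      rw [hb, PySem.List.pyRange_one_cons hn, List.foldl_cons]
      have hstep : pvBodyA (x :: y :: ys) H 0
          = (y :: ys).foldl (fun H z => pvBump H x z) (pvEnsure H x) := by
        rw [pv_bodyA_eq _ _ _ le_rfl]
        have hget : PySem.List.pyGetD (x :: y :: ys) 0 "" = x := by
          rw [PySem.List.pyGetD_of_nonneg _ _ le_rfl]; rfl
        have hdrop : (x :: y :: ys).drop ((0 : Int) + 1).toNat = y :: ys := by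
          norm_num
        rw [hget, hdrop]
      rw [hstep]
      have hpairs : pairs2 (x :: y :: ys)
          = ((y :: ys).map (fun z => (x, z))) ++ pairs2 (y :: ys) := rfl
      rw [hpairs, List.foldl_append, List.foldl_map]
      have hgrp : (y :: ys).foldl (fun H z => pvBump H x z) (pvEnsure H x)
          = (y :: ys).foldl (fun H z => pvEbump H (x, z)) H := by
        rw [List.foldl_cons, List.foldl_cons]
        have : pvEbump H (x, y) = pvBump (pvEnsure H x) x y := rfl
        rw [this]
        exact pv_group ys _ x (by rw [pvBump]; exact PySem.Dict.contains_insert_self _ _ _)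
      rw [hgrp]
      have h01 : (0 : Int) + 1 = 1 := by norm_num
      rw [h01, pv_shift]
      exact ih _

theorem pv_A_fold (df : List (List String)) :
    df.foldl (fun H h =>
      (PySem.List.pyRange 0 ((h.length : Int) - 1) 1).foldl (fun H i =>
        let hi := PySem.List.pyGetD h i ""
        let H := if H.contains hi then H else H.insert hi PySem.Dict.empty
        (PySem.List.pyRange (i + 1) (h.length : Int) 1).foldl (fun H j =>
          let hj := PySem.List.pyGetD h j ""
          let inner := H.getD hi PySem.Dict.empty
          if inner.contains hj then
            H.insert hi (inner.insert hj (inner.getD hj 0 + 1))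
          else
            H.insert hi (inner.insert hj 1)) H) H)
      (PySem.Dict.empty : PySem.Dict String (PySem.Dict String Int))
    = pvCanon (df.flatMap pairs2) := by
  have h1 : (fun (H : PySem.Dict String (PySem.Dict String Int)) (h : List String) =>
      (PySem.List.pyRange 0 ((h.length : Int) - 1) 1).foldl (pvBodyA h) H)
      = fun H h => (pairs2 h).foldl pvEbump H := by
    funext H h
    exact pv_outer h H
  show df.foldl (fun H h => (PySem.List.pyRange 0 ((h.length : Int) - 1) 1).foldl (pvBodyA h) H)
      PySem.Dict.empty = _
  rw [h1, ← List.foldl_flatMap, pv_main]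

theorem pv_slice_last (h : List String) :
    PySem.List.slice h none (some (-1)) = h.dropLast := by
  show List.take (PySem.List.clampIdx h.length (-1) - PySem.List.clampIdx h.length 0) (List.drop (PySem.List.clampIdx h.length 0) h) = _
  rw [List.dropLast_eq_take]
  have h0 : PySem.List.clampIdx h.length 0 = 0 := by
    simp [PySem.List.clampIdx]
  have h1 : PySem.List.clampIdx h.length (-1) = h.length - 1 := by
    simp only [PySem.List.clampIdx]
    split_ifs with hc hd
    · omega
    · omega
    · omega
  rw [h0, h1]
  simp

theorem pv_modify_chunk (ch : List String) (hne : ch ≠ [])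
    (d : PySem.Dict String (List String)) (a : String) :
    d.modify a [] (fun l => l ++ ch)
      = ch.foldl (fun d b => d.modify a [] (fun l => l ++ [b])) d := by
  induction ch generalizing d with
  | nil => exact absurd rfl hne
  | cons b ch ih =>
    by_cases hch : ch = []
    · subst hch; rfl
    · rw [List.foldl_cons, ← ih hch]
      show d.insert a (d.getD a [] ++ b :: ch)
        = (d.insert a (d.getD a [] ++ [b])).insert a
            ((d.insert a (d.getD a [] ++ [b])).getD a [] ++ ch)
      rw [PySem.Dict.getD_insert_self, PySem.Dict.insert_insert_self, List.append_assoc]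
      rfl

theorem pv_tweetB (xs h : List String) (s : Nat) (hd : h.drop s = xs)
    (d : PySem.Dict String (List String)) :
    (PySem.List.enumerate xs.dropLast (s : Int)).foldl
      (fun d ka => d.modify ka.2 [] (fun l => l ++ PySem.List.slice h (some (ka.1 + 1)) none)) d
      = (pairs2 xs).foldl (fun d p => d.modify p.1 [] (fun l => l ++ [p.2])) d := by
  induction xs generalizing s d with
  | nil => rfl
  | cons x xs ih =>
    cases xs with
    | nil => rfl
    | cons y ys =>
      rw [List.dropLast_cons₂, PySem.List.enumerate_cons, List.foldl_cons]
      have hdrop : h.drop (s + 1) = y :: ys := by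
        have := congrArg (List.drop 1) hd
        simpa [List.drop_drop, Nat.add_comm] using this
      have hslice : PySem.List.slice h (some ((s : Int) + 1)) none = y :: ys := by
        rw [PySem.List.slice_from h (by positivity)]
        have : ((s : Int) + 1).toNat = s + 1 := by omega
        rw [this, hdrop]
      rw [hslice, pv_modify_chunk (y :: ys) (by simp) d x]
      have hs : ((s : Int) + 1) = ((s + 1 : Nat) : Int) := by push_cast; ring
      rw [hs, ih (s + 1) hdrop]
      show _ = ((y :: ys).map (fun z => (x, z)) ++ pairs2 (y :: ys)).foldl _ d
      rw [List.foldl_append, List.foldl_map]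

theorem pv_count_bridge (P : List (String × String)) (a b : String) :
    ((P.filter (fun p => p.1 == a)).map (·.2)).count b = P.count (a, b) := by
  rw [List.count, List.count, List.countP_map, List.countP_filter]
  apply List.countP_congr
  intro p _
  cases p
  show ((_ == b) && (_ == a)) = true ↔ _
  rw [Bool.and_eq_true, beq_iff_eq, beq_iff_eq, beq_iff_eq, Prod.mk.injEq]
  tauto

theorem pv_B (df : List (List String)) :
    get_cooccurrence_matrix_alt df
      = (pvFirsts (df.flatMap pairs2)).map
          (fun a => (a, pvInner (df.flatMap pairs2) a)) := by
  unfold get_cooccurrence_matrix_alt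
  show ((df.foldl (fun d h =>
      (PySem.List.enumerate (PySem.List.slice h none (some (-1)))).foldl
        (fun d ka => d.modify ka.2 [] (fun l => l ++ PySem.List.slice h (some (ka.1 + 1)) none)) d)
      (PySem.Dict.empty : PySem.Dict String (List String))).items).map
      (fun kv => (kv.1, (kv.2.foldl (fun inner b => inner.insert b (inner.getD b 0 + 1))
        (PySem.Dict.empty : PySem.Dict String Int)).items)) = _
  have hloop : (fun (d : PySem.Dict String (List String)) (h : List String) =>
      (PySem.List.enumerate (PySem.List.slice h none (some (-1)))).foldl
        (fun d ka => d.modify ka.2 [] (fun l => l ++ PySem.List.slice h (some (ka.1 + 1)) none)) d)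
      = fun d h => (pairs2 h).foldl (fun d p => d.modify p.1 [] (fun l => l ++ [p.2])) d := by
    funext d h
    rw [pv_slice_last]
    have := pv_tweetB h h 0 (by simp) d
    simpa using this
  rw [hloop, ← List.foldl_flatMap]
  set P := df.flatMap pairs2 with hP
  have hnodup : (P.foldl (fun d p => d.modify p.1 [] (fun l => l ++ [p.2]))
      (PySem.Dict.empty : PySem.Dict String (List String))).keys.Nodup :=
    PySem.Dict.nodup_keys_foldl_modify_key P (fun p => p.1) [] (fun _ p l => l ++ [p.2])
      PySem.Dict.empty (by simp [PySem.Dict.empty, PySem.Dict.keys])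
  have hkeys : (P.foldl (fun d p => d.modify p.1 [] (fun l => l ++ [p.2]))
      (PySem.Dict.empty : PySem.Dict String (List String))).keys = pvFirsts P := by
    rw [PySem.Dict.keys_foldl_modify_key]
    show PySem.Set.update ((PySem.Dict.empty : PySem.Dict String (List String)).keys) _ = _
    rw [PySem.Dict.keys_empty, PySem.Set.update_nil_left, pvFirsts]
  rw [PySem.Dict.items_eq_map_keys _ hnodup [], hkeys, List.map_map]
  apply List.map_congr_left
  intro a _
  have hgd : (P.foldl (fun d p => d.modify p.1 [] (fun l => l ++ [p.2]))
      (PySem.Dict.empty : PySem.Dict String (List String))).getD a []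
      = (P.filter (fun p => p.1 == a)).map (·.2) := by
    rw [PySem.Dict.getD_foldl_modify_append, PySem.Dict.getD_empty]
    simp
  simp only [Function.comp_apply, hgd]
  rw [PySem.Dict.foldl_insert_getD_add_one_eq_counter, PySem.Dict.items_counter, pvInner]
  refine congrArg _ ?_
  apply List.map_congr_left
  intro b _
  rw [pv_count_bridge]

-- ===== VERDICT (by name: the statement is the Claim_ definition above) =====
theorem get_cooccurrence_matrix_spec : Claim_equal_get_cooccurrence_matrix := by
  intro df _
  unfold Spec_get_cooccurrence_matrix
  rw [pv_B]
  unfold get_cooccurrence_matrix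
  rw [pv_A_fold]
  show ((pvFirsts (df.flatMap pairs2)).map
      (fun a => (a, PySem.Dict.mk (pvInner (df.flatMap pairs2) a)))).map
      (fun kv => (kv.1, kv.2.items)) = _
  rw [List.map_map]
  rfl
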